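-- pv_equiv track=rewrite | github.com/khaishen314/name-detection-app | utils/get_optimal_w_s.py | sort_to_rank
-- ===== SOURCE A (Python) =====
-- def sort_to_rank(node_dict: dict) -> list:
--     sorted_node = sorted(node_dict.items(), key=lambda x: x[1], reverse=True)
--
--     node_rank = []
--     current_rank = 1
--     current_score = None
--
--     for node, score in sorted_node:
--         if score != current_score:
--             if current_score is not None:
--                 current_rank += 1
--             current_score = score
--
--             if len(node_rank) < current_rank:
--                 node_rank.append([])
--
--         node_rank[current_rank - 1].append(node)
--
--     return node_rank
-- ===== SOURCE B (Python) =====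
-- def sort_to_rank(node_dict: dict) -> list:
--     groups = {}
--     for node, score in node_dict.items():
--         groups.setdefault(score, []).append(node)
--     return [groups[s] for s in sorted(groups, reverse=True)]
-- ===== Notes on version B (the rewrite author's own statement) =====
-- stated objective: simpler
-- what changed: Groups nodes into a dict keyed by score in one pass, then sorts only the distinct scores descending, instead of stably sorting all items and scanning for rank boundaries with a running rank counter.
import Mathlib
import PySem

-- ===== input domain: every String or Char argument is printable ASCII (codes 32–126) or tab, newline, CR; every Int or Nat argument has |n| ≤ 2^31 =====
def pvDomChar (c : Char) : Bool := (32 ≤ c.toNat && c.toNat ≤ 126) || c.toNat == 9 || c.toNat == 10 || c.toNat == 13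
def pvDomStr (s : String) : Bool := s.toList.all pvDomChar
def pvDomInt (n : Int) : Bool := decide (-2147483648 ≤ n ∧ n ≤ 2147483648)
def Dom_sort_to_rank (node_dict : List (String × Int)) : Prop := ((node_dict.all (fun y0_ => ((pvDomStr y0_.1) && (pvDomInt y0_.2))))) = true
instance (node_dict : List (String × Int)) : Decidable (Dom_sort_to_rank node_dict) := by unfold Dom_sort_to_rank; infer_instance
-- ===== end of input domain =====

-- B groups nodes by score in one dict pass and sorts only the distinct scores descending,
-- instead of A's stable full sort followed by a rank-boundary scan; objective: simpler.

-- ===== PORT A =====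
-- one iteration of A's `for node, score in sorted_node` loop; state = (node_rank, current_rank, current_score)
def sort_to_rank_step (st : List (List String) × Nat × Option Int) (p : String × Int) :
    List (List String) × Nat × Option Int :=
  let nr := st.1
  let cr := st.2.1
  let cs := st.2.2
  if some p.2 ≠ cs then
    let cr' := if cs ≠ none then cr + 1 else cr
    let nr' := if nr.length < cr' then nr ++ [[]] else nr
    -- node_rank[current_rank - 1].append(node); the index is always in range here
    (nr'.modify (cr' - 1) (fun g => g ++ [p.1]), cr', some p.2)
  else
    (nr.modify (cr - 1) (fun g => g ++ [p.1]), cr, cs)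

def sort_to_rank (node_dict : List (String × Int)) : List (List String) :=
  ((PySem.List.sorted node_dict (fun x => x.2) true).foldl sort_to_rank_step ([], 1, none)).1

-- ===== PORT B =====
def sort_to_rank_alt (node_dict : List (String × Int)) : List (List String) :=
  let groups : PySem.Dict Int (List String) :=
    node_dict.foldl (fun d p => d.modify p.2 ([] : List String) (fun v => v ++ [p.1])) PySem.Dict.empty
  (PySem.List.sorted groups.keys (fun s => s) true).map (fun s => groups.getD s [])

-- ===== PRECONDITION & SPEC =====
def Spec_sort_to_rank (node_dict : List (String × Int)) (out : List (List String)) : Prop := out = sort_to_rank_alt node_dict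
instance (node_dict : List (String × Int)) (out : List (List String)) : Decidable (Spec_sort_to_rank node_dict out) := by unfold Spec_sort_to_rank; infer_instance

-- ===== CLAIM (what is proved, stated in full; the proofs are below) =====
def Claim_equal_sort_to_rank : Prop := ∀ (node_dict : List (String × Int)), Dom_sort_to_rank node_dict → Spec_sort_to_rank node_dict (sort_to_rank node_dict)

-- ===== LEMMAS AND PROOFS =====

-- the rank buckets of an already (descending-by-score) sorted list, as a direct recursion
def pvBuckets : List (String × Int) → List (List String)
  | [] => []
  | (n, s) :: t =>
      (n :: (t.takeWhile (fun p => p.2 == s)).map (fun p => p.1)) ::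
        pvBuckets (t.dropWhile (fun p => p.2 == s))
termination_by l => l.length
decreasing_by simpa using Nat.lt_succ_of_le (List.length_dropWhile_le _ t)

-- unfolding pvBuckets at a cons
lemma pvBuckets_cons (n : String) (s : Int) (t : List (String × Int)) :
    pvBuckets ((n, s) :: t)
      = (n :: (t.takeWhile (fun p => p.2 == s)).map (fun p => p.1)) ::
          pvBuckets (t.dropWhile (fun p => p.2 == s)) := by
  rw [pvBuckets]

-- modifying the last slot of node_rank
lemma pv_modify_last (acc : List (List String)) (g : List String) (f : List String → List String) :
    (acc ++ [g]).modify acc.length f = acc ++ [f g] := by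
  rw [List.modify_eq_set, List.getElem?_concat_length, List.set_append_right _ _ (le_refl _)]
  simp

-- stability of Python's sort: filtering one score value commutes with the sort
lemma pv_filter_insertBy (x : String × Int) (ys : List (String × Int))
    (h : ys.Pairwise (fun a b => b.2 ≤ a.2)) (s : Int) :
    (PySem.List.insertBy (fun a b => decide (b.2 < a.2)) x ys).filter (fun p => p.2 == s)
      = if x.2 == s then ys.filter (fun p => p.2 == s) ++ [x]
        else ys.filter (fun p => p.2 == s) := by
  induction ys with
  | nil =>
    by_cases hxs : x.2 = s <;> simp [PySem.List.insertBy, hxs]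
  | cons y ys ih =>
    by_cases hlt : y.2 < x.2
    · simp only [PySem.List.insertBy, hlt, decide_true, if_true]
      by_cases hxs : x.2 = s
      · have hnil : List.filter (fun p => p.2 == s) (y :: ys) = [] := by
          rw [List.filter_eq_nil_iff]
          intro p hp
          rcases List.mem_cons.1 hp with hp | hp
          · subst hp; simp; omega
          · have : p.2 ≤ y.2 := (List.pairwise_cons.1 h).1 p hp
            simp; omega
        rw [List.filter_cons_of_pos (by simp [hxs]), hnil]
        simp [hxs]
      · rw [List.filter_cons_of_neg (by simp [hxs])]
        simp [hxs]
    · simp only [PySem.List.insertBy, hlt, decide_false, Bool.false_eq_true, if_false,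
        List.filter_cons]
      rw [ih (List.pairwise_cons.1 h).2]
      by_cases hxs : x.2 = s <;> by_cases hys : y.2 = s <;> simp [hxs, hys]

lemma pv_filter_sorted (nd : List (String × Int)) (s : Int) :
    (PySem.List.sorted nd (fun x => x.2) true).filter (fun p => p.2 == s)
      = nd.filter (fun p => p.2 == s) := by
  induction nd using List.reverseRecOn with
  | nil =>
    rw [(PySem.List.sorted_eq_nil_iff _ _ _).2 rfl]
  | append_singleton xs x ih =>
    rw [PySem.List.sorted_rev_eq_foldl_insertBy, List.foldl_append,
      ← PySem.List.sorted_rev_eq_foldl_insertBy]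
    simp only [List.foldl_cons, List.foldl_nil]
    rw [pv_filter_insertBy x _ (PySem.List.sorted_pairwise_rev xs _) s, List.filter_append, ih]
    by_cases hxs : x.2 = s <;> simp [hxs]

-- loop invariant of A's scan over the sorted list
lemma pv_scan (ys : List (String × Int)) : ∀ (s : Int) (acc : List (List String)) (g : List String),
    (ys.foldl sort_to_rank_step (acc ++ [g], acc.length + 1, some s)).1
      = acc ++ (g ++ (ys.takeWhile (fun p => p.2 == s)).map (fun p => p.1)) ::
          pvBuckets (ys.dropWhile (fun p => p.2 == s)) := by
  induction ys with
  | nil => intro s acc g; simp [pvBuckets]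
  | cons q ys ih =>
    intro s acc g
    obtain ⟨n, t⟩ := q
    by_cases hts : t = s
    · subst hts
      have hstep : sort_to_rank_step (acc ++ [g], acc.length + 1, some t) (n, t)
          = (acc ++ [g ++ [n]], acc.length + 1, some t) := by
        simp [sort_to_rank_step, pv_modify_last]
      rw [List.foldl_cons, hstep, ih]
      rw [List.takeWhile_cons_of_pos (by simp), List.dropWhile_cons_of_pos (by simp)]
      simp
    · have hstep : sort_to_rank_step (acc ++ [g], acc.length + 1, some s) (n, t)
          = ((acc ++ [g]) ++ [[n]], (acc ++ [g]).length + 1, some t) := by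
        have hmod : ((acc ++ [g]) ++ [[]]).modify (acc ++ [g]).length (fun v => v ++ [n])
            = (acc ++ [g]) ++ [[n]] := by
          rw [pv_modify_last]
          simp
        simp only [sort_to_rank_step]
        simp only [List.length_append, List.length_cons, List.length_nil]
        have h1 : (some t ≠ some s) := by simpa using hts
        have h2 : (some s ≠ (none : Option Int)) := by simp
        simp only [List.length_append, List.length_cons] at hmod
        simp [h1, h2]
        simpa using hmod
      rw [List.foldl_cons, hstep, ih]
      rw [List.takeWhile_cons_of_neg (by simpa using hts),
        List.dropWhile_cons_of_neg (by simpa using hts)]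
      rw [pvBuckets_cons]
      simp

lemma pv_a_eq_buckets (nd : List (String × Int)) :
    sort_to_rank nd = pvBuckets (PySem.List.sorted nd (fun x => x.2) true) := by
  unfold sort_to_rank
  cases h : PySem.List.sorted nd (fun x => x.2) true with
  | nil => simp [pvBuckets]
  | cons q rest =>
    obtain ⟨n, t⟩ := q
    have hstep : sort_to_rank_step ([], 1, none) (n, t)
        = (([] : List (List String)) ++ [[n]], ([] : List (List String)).length + 1, some t) := by
      have hm := pv_modify_last [] [] (fun v => v ++ [n])
      simp only [List.nil_append, List.length_nil] at hm ⊢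
      simp [sort_to_rank_step, hm]
    rw [List.foldl_cons, hstep, pv_scan]
    rw [pvBuckets_cons]
    simp

-- folding Set.add over elements already present leaves the set unchanged
lemma pv_foldl_add_mem (l : List Int) (acc : PySem.Set Int) (h : ∀ x ∈ l, x ∈ acc) :
    l.foldl PySem.Set.add acc = acc := by
  induction l with
  | nil => rfl
  | cons x xs ih =>
    rw [List.foldl_cons, PySem.Set.add_of_mem (h x (by simp))]
    exact ih (fun y hy => h y (by simp [hy]))

-- an element absent from the rest of the fold stays at the front
lemma pv_foldl_add_cons (s : Int) (l : List Int) (hs : s ∉ l) :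
    ∀ acc : PySem.Set Int, s ∉ acc → l.foldl PySem.Set.add (s :: acc) = s :: l.foldl PySem.Set.add acc := by
  induction l with
  | nil => intro acc _; rfl
  | cons x xs ih =>
    intro acc hacc
    have hxs : x ≠ s := fun h => hs (by simp [h])
    rw [List.foldl_cons, List.foldl_cons, PySem.Set.add_eq_ite, PySem.Set.add_eq_ite]
    by_cases hx : x ∈ acc
    · rw [if_pos (by simp [hx]), if_pos hx]
      exact ih (fun h => hs (by simp [h])) acc hacc
    · have : x ∉ (s :: acc) := by simp [hx, hxs]
      rw [if_neg this, if_neg hx]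
      have hsx : s ∉ acc ++ [x] := by
        simp only [List.mem_append, List.mem_singleton]
        rintro (h | h)
        · exact hacc h
        · exact hxs h.symm
      simpa using ih (fun h => hs (by simp [h])) (acc ++ [x]) hsx

lemma pv_buckets_spec (ys : List (String × Int)) (hpw : ys.Pairwise (fun a b => b.2 ≤ a.2)) :
    pvBuckets ys
        = (PySem.Set.ofList (ys.map (fun p => p.2))).map
            (fun s => (ys.filter (fun p => p.2 == s)).map (fun p => p.1))
      ∧ (PySem.Set.ofList (ys.map (fun p => p.2))).Pairwise (fun a b => b < a) := by
  induction ys using pvBuckets.induct with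
  | case1 => simp [pvBuckets]
  | case2 n s t ih =>
    have hq := List.pairwise_cons.1 hpw
    have ht1s : ∀ p ∈ t.takeWhile (fun p => p.2 == s), p.2 = s := by
      intro p hp
      simpa using List.mem_takeWhile_imp hp
    have ht2pw : (t.dropWhile (fun p => p.2 == s)).Pairwise (fun a b => b.2 ≤ a.2) :=
      List.Pairwise.sublist (List.dropWhile_sublist _) hq.2
    have ht2lt : ∀ p ∈ t.dropWhile (fun p => p.2 == s), p.2 < s := by
      intro p hp
      cases h2 : t.dropWhile (fun p => p.2 == s) with
      | nil => rw [h2] at hp; simp at hp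
      | cons hd r =>
        rw [h2] at hp
        have hhd : ((fun p => p.2 == s) hd) = false := by
          have hx := List.head_dropWhile_not (l := t) (fun p => p.2 == s) (by simp [h2])
          simp only [h2, List.head_cons] at hx
          exact hx
        have hhdne : hd.2 ≠ s := by simpa using hhd
        have hhdle : hd.2 ≤ s :=
          hq.1 hd ((List.dropWhile_sublist _).subset (by rw [h2]; simp))
        rcases List.mem_cons.1 hp with hp | hp
        · subst hp; omega
        · have : p.2 ≤ hd.2 := (List.pairwise_cons.1 (h2 ▸ ht2pw)).1 p hp
          omega
    have hsplit : t.takeWhile (fun p => p.2 == s) ++ t.dropWhile (fun p => p.2 == s) = t :=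
      List.takeWhile_append_dropWhile
    have hsnot : s ∉ (t.dropWhile (fun p => p.2 == s)).map (fun p => p.2) := by
      intro hmem
      obtain ⟨p, hp, hps⟩ := List.mem_map.1 hmem
      exact absurd hps (by have := ht2lt p hp; omega)
    have hscores : PySem.Set.ofList (((n, s) :: t).map (fun p => p.2))
        = s :: PySem.Set.ofList ((t.dropWhile (fun p => p.2 == s)).map (fun p => p.2)) := by
      rw [PySem.Set.ofList_eq_foldl, PySem.Set.ofList_eq_foldl]
      rw [List.map_cons, List.foldl_cons]
      have hadd : PySem.Set.add ([] : PySem.Set Int) s = [s] := by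
        rw [PySem.Set.add_eq_ite]
        simp
      have hmem1 : ∀ x ∈ (t.takeWhile (fun p => p.2 == s)).map (fun p => p.2), x ∈ ([s] : List Int) := by
        intro x hx
        obtain ⟨p, hp, rfl⟩ := List.mem_map.1 hx
        simp [ht1s p hp]
      have hmsplit : t.map (fun p => p.2)
          = (t.takeWhile (fun p => p.2 == s)).map (fun p => p.2)
            ++ (t.dropWhile (fun p => p.2 == s)).map (fun p => p.2) := by
        rw [← List.map_append, hsplit]
      rw [hadd, hmsplit, List.foldl_append, pv_foldl_add_mem _ _ hmem1]
      exact pv_foldl_add_cons s _ hsnot [] (by simp)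
    have hfilt_s : (((n, s) :: t).filter (fun p => p.2 == s)).map (fun p => p.1)
        = n :: (t.takeWhile (fun p => p.2 == s)).map (fun p => p.1) := by
      have hfsplit : t.filter (fun p => p.2 == s) = t.takeWhile (fun p => p.2 == s) := by
        conv_lhs => rw [← hsplit]
        rw [List.filter_append,
          List.filter_eq_self.2 (fun p hp => by simp [ht1s p hp]),
          List.filter_eq_nil_iff.2 (fun p hp => by have := ht2lt p hp; simp; omega)]
        simp
      rw [List.filter_cons_of_pos (by simp), hfsplit, List.map_cons]
    have hfilt_lt : ∀ s' : Int, s' < s →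
        ((n, s) :: t).filter (fun p => p.2 == s')
          = (t.dropWhile (fun p => p.2 == s)).filter (fun p => p.2 == s') := by
      intro s' hlt
      have hfsplit : t.filter (fun p => p.2 == s')
          = (t.dropWhile (fun p => p.2 == s)).filter (fun p => p.2 == s') := by
        conv_lhs => rw [← hsplit]
        rw [List.filter_append,
          List.filter_eq_nil_iff.2 (fun p hp => by have := ht1s p hp; simp; omega)]
        simp
      rw [List.filter_cons_of_neg (by simp; omega), hfsplit]
    obtain ⟨ihb, ihpw⟩ := ih ht2pw
    constructor
    · rw [pvBuckets_cons, hscores, List.map_cons, hfilt_s, ihb]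
      congr 1
      apply List.map_congr_left
      intro s' hs'
      have hs'lt : s' < s := by
        obtain ⟨p, hp, rfl⟩ := List.mem_map.1 ((PySem.Set.mem_ofList _ _).1 hs')
        exact ht2lt p hp
      rw [hfilt_lt s' hs'lt]
    · rw [hscores]
      refine List.pairwise_cons.2 ⟨?_, ihpw⟩
      intro s' hs'
      obtain ⟨p, hp, rfl⟩ := List.mem_map.1 ((PySem.Set.mem_ofList _ _).1 hs')
      exact ht2lt p hp

lemma pv_alt_eq (nd : List (String × Int)) :
    sort_to_rank_alt nd
      = (PySem.List.sorted (PySem.Set.ofList (nd.map (fun p => p.2))) (fun s => s) true).map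
          (fun s => (nd.filter (fun p => p.2 == s)).map (fun p => p.1)) := by
  unfold sort_to_rank_alt
  have hkeys : (nd.foldl (fun d p => d.modify p.2 ([] : List String) (fun v => v ++ [p.1]))
        PySem.Dict.empty).keys = PySem.Set.ofList (nd.map (fun p => p.2)) := by
    rw [PySem.Dict.keys_foldl_modify_key nd (fun p => p.2) ([] : List String)
      (fun _ p => (fun v => v ++ [p.1])) PySem.Dict.empty]
    simp [PySem.Set.update_nil_left]
  have hgetD : ∀ c : Int, (nd.foldl (fun d p => d.modify p.2 ([] : List String) (fun v => v ++ [p.1]))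
        PySem.Dict.empty).getD c [] = (nd.filter (fun p => p.2 == c)).map (fun p => p.1) := by
    intro c
    have h1 : nd.foldl (fun d p => d.modify p.2 ([] : List String) (fun v => v ++ [p.1]))
          PySem.Dict.empty
        = (nd.map (fun p => (p.2, p.1))).foldl
            (fun d q => d.modify q.1 ([] : List String) (fun v => v ++ [q.2])) PySem.Dict.empty := by
      rw [List.foldl_map]
    rw [h1, PySem.Dict.getD_foldl_modify_append]
    simp [List.filter_map, Function.comp_def]
  simp only [hgetD, hkeys]

-- ===== VERDICT (by name: the statement is the Claim_ definition above) =====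
theorem sort_to_rank_spec : Claim_equal_sort_to_rank := by
  intro nd _
  unfold Spec_sort_to_rank
  rw [pv_a_eq_buckets, pv_alt_eq]
  obtain ⟨hb, hgt⟩ := pv_buckets_spec _ (PySem.List.sorted_pairwise_rev nd (fun x => x.2))
  rw [hb]
  have hperm : (PySem.Set.ofList
        ((PySem.List.sorted nd (fun x => x.2) true).map (fun p => p.2))).Perm
      (PySem.Set.ofList (nd.map (fun p => p.2))) := by
    rw [List.perm_ext_iff_of_nodup (PySem.Set.nodup_ofList _) (PySem.Set.nodup_ofList _)]
    intro a
    constructor <;> intro ha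
    · obtain ⟨p, hp, rfl⟩ := List.mem_map.1 ((PySem.Set.mem_ofList _ _).1 ha)
      exact (PySem.Set.mem_ofList _ _).2 (List.mem_map.2
        ⟨p, (PySem.List.sorted_perm nd (fun x => x.2) true).mem_iff.1 hp, rfl⟩)
    · obtain ⟨p, hp, rfl⟩ := List.mem_map.1 ((PySem.Set.mem_ofList _ _).1 ha)
      exact (PySem.Set.mem_ofList _ _).2 (List.mem_map.2
        ⟨p, (PySem.List.sorted_perm nd (fun x => x.2) true).mem_iff.2 hp, rfl⟩)
  rw [PySem.List.sorted_rev_eq_of_perm_of_pairwise_gt _ _ _ hperm (by simpa using hgt)]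
  apply List.map_congr_left
  intro s _
  rw [pv_filter_sorted]
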